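-- pv_equiv track=rewrite | github.com/Grischaa/Scouting_ML | src/scouting_ml/scripts/build_player_transfers.py | _detect_column_index
-- ===== SOURCE A (Python) =====
-- from typing import Dict, Iterable, List, Sequence
--
-- def _detect_column_index(headers: Sequence[str], tokens: Sequence[str], fallback: int | None = None) -> int | None:
--     for i, header in enumerate(headers):
--         h = header.lower()
--         if all(tok in h for tok in tokens):
--             return i
--     for i, header in enumerate(headers):
--         h = header.lower()
--         if any(tok in h for tok in tokens):
--             return i
--     return fallback
-- ===== SOURCE B (Python) =====
-- def _detect_column_index(headers, tokens, fallback=None):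
--     # Deferred-verification scan: one pass computes, per header, the position k
--     # of the first token NOT contained in it.  k == len(tokens) means a full
--     # match (return immediately); k > 0 proves the header contains a token, so
--     # the first such index becomes known_any; k == 0 leaves the any-status
--     # unknown, so (index, lowered header) is parked in `pending`.  Afterwards
--     # the pending headers (all earlier than known_any) are resolved in order.
--     pending = []
--     known_any = None
--     for i, header in enumerate(headers):
--         h = header.lower()
--         k = next((k for k, tok in enumerate(tokens) if tok not in h), len(tokens))
--         if k == len(tokens):
--             return i
--         if known_any is None:
--             if k > 0:
--                 known_any = i
--             else:
--                 pending.append((i, h))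
--     for i, h in pending:
--         if any(tok in h for tok in tokens):
--             return i
--     return known_any if known_any is not None else fallback
-- ===== Notes on version B (the rewrite author's own statement) =====
-- stated objective: alternative
-- what changed: Replaces A's two staged boolean scans with a deferred-verification single pass: per header it finds the first missing-token position k (k=len(tokens) returns immediately, k>0 records the first known any-match, k=0 parks the header as unknown), then resolves the parked headers in order, preserving all-match-over-any-match priority at the same cost.
import Mathlib
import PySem

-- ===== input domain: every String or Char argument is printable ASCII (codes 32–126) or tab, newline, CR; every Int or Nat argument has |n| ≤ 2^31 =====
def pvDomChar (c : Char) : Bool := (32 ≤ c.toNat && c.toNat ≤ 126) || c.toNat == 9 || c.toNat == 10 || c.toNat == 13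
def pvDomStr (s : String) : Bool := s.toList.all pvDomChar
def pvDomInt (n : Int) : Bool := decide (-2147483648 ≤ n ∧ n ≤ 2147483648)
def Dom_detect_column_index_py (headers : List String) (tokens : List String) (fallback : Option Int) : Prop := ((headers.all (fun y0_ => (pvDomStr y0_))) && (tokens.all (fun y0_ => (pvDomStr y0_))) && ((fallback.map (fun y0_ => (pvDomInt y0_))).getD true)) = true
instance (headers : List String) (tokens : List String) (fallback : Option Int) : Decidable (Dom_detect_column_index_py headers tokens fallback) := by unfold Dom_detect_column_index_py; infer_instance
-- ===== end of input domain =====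

-- B replaces A's two staged boolean scans with a deferred-verification single pass: per header it
-- finds the first missing-token position k (k = len -> return, k > 0 -> first known any-match,
-- k = 0 -> parked as unknown), then resolves the parked headers; same result.
-- ===== PORT A =====
-- first loop of A: first index whose lowercased header contains ALL tokens
def pvFindAll (headers : List String) (tokens : List String) (i : Int) : Option Int :=
  match headers with
  | [] => none
  | header :: rest =>
    if tokens.all (fun tok => PySem.Str.isIn tok (PySem.Str.lower header)) then some i
    else pvFindAll rest tokens (i + 1)

-- second loop of A: first index whose lowercased header contains ANY token
def pvFindAny (headers : List String) (tokens : List String) (i : Int) : Option Int :=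
  match headers with
  | [] => none
  | header :: rest =>
    if tokens.any (fun tok => PySem.Str.isIn tok (PySem.Str.lower header)) then some i
    else pvFindAny rest tokens (i + 1)

def detect_column_index_py (headers : List String) (tokens : List String) (fallback : Option Int) : Option Int :=
  match pvFindAll headers tokens 0 with
  | some i => some i
  | none =>
    match pvFindAny headers tokens 0 with
    | some i => some i
    | none => fallback

-- ===== PORT B =====
-- B's inner genexp: position of the first token not contained in h (len(tokens) if none missing)
def pvFirstMiss (toks : List String) (h : String) : Nat :=
  match toks with
  | [] => 0
  | tok :: rest => if PySem.Str.isIn tok h then pvFirstMiss rest h + 1 else 0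

-- B's second loop: resolve the parked (index, lowered header) pairs, then known_any, then fallback
def pvResolve (pending : List (Int × String)) (tokens : List String) (knownAny fallback : Option Int) : Option Int :=
  match pending with
  | [] =>
    match knownAny with
    | some a => some a
    | none => fallback
  | (i, h) :: rest =>
    if tokens.any (fun tok => PySem.Str.isIn tok h) then some i
    else pvResolve rest tokens knownAny fallback

-- B's main loop: classify each header by its first-miss position k
def pvDefer (headers : List String) (tokens : List String) (i : Int) (pending : List (Int × String)) (knownAny : Option Int) (fallback : Option Int) : Option Int :=
  match headers with
  | [] => pvResolve pending tokens knownAny fallback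
  | header :: rest =>
    let h := PySem.Str.lower header
    let k := pvFirstMiss tokens h
    if k = tokens.length then some i
    else
      match knownAny with
      | some _ => pvDefer rest tokens (i + 1) pending knownAny fallback
      | none =>
        if 0 < k then pvDefer rest tokens (i + 1) pending (some i) fallback
        else pvDefer rest tokens (i + 1) (pending ++ [(i, h)]) none fallback

def detect_column_index_py_alt (headers : List String) (tokens : List String) (fallback : Option Int) : Option Int :=
  pvDefer headers tokens 0 [] none fallback

-- ===== PRECONDITION & SPEC =====
def Spec_detect_column_index_py (headers : List String) (tokens : List String) (fallback : Option Int) (out : Option Int) : Prop := out = detect_column_index_py_alt headers tokens fallback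
instance (headers : List String) (tokens : List String) (fallback : Option Int) (out : Option Int) : Decidable (Spec_detect_column_index_py headers tokens fallback out) := by unfold Spec_detect_column_index_py; infer_instance

-- ===== CLAIM (what is proved, stated in full; the proofs are below) =====
def Claim_equal_detect_column_index_py : Prop := ∀ (headers : List String) (tokens : List String) (fallback : Option Int), Dom_detect_column_index_py headers tokens fallback → Spec_detect_column_index_py headers tokens fallback (detect_column_index_py headers tokens fallback)

-- ===== LEMMAS AND PROOFS =====
-- k = len(tokens) exactly when every token is contained
theorem pvFirstMiss_eq_len_iff (h : String) (toks : List String) :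
    pvFirstMiss toks h = toks.length ↔ toks.all (fun tok => PySem.Str.isIn tok h) = true := by
  induction toks with
  | nil => simp [pvFirstMiss]
  | cons tok rest ih =>
    simp only [pvFirstMiss, List.all_cons, List.length_cons]
    cases hin : PySem.Str.isIn tok h
    · simp
    · simp [ih]

-- k > 0 proves the first token is contained, hence an any-match
theorem pvFirstMiss_pos_any (h : String) (toks : List String)
    (hk : 0 < pvFirstMiss toks h) : toks.any (fun tok => PySem.Str.isIn tok h) = true := by
  cases toks with
  | nil => simp [pvFirstMiss] at hk
  | cons tok rest =>
    simp only [pvFirstMiss] at hk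
    cases hin : PySem.Str.isIn tok h
    · rw [hin] at hk; simp at hk
    · simp only [List.any_cons, hin, Bool.true_or]

-- a set known_any behaves like an empty fallback slot
theorem pvResolve_known (tokens : List String) : ∀ (pending : List (Int × String)) (a : Int) (fb : Option Int),
    pvResolve pending tokens (some a) fb = pvResolve pending tokens none (some a) := by
  intro pending
  induction pending with
  | nil => intro a fb; rfl
  | cons p rest ih =>
    intro a fb
    obtain ⟨j, g⟩ := p
    simp only [pvResolve]
    by_cases hc : tokens.any (fun tok => PySem.Str.isIn tok g) = true
    · rw [if_pos hc, if_pos hc]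
    · rw [if_neg hc, if_neg hc, ih]

-- parking one more header moves its any-check into the fallback slot
theorem pvResolve_append (tokens : List String) : ∀ (pending : List (Int × String)) (i : Int) (h : String) (fb : Option Int),
    pvResolve (pending ++ [(i, h)]) tokens none fb =
      pvResolve pending tokens none
        (if tokens.any (fun tok => PySem.Str.isIn tok h) = true then some i else fb) := by
  intro pending
  induction pending with
  | nil =>
    intro i h fb
    simp only [List.nil_append, pvResolve]
  | cons p rest ih =>
    intro i h fb
    obtain ⟨j, g⟩ := p
    simp only [List.cons_append, pvResolve]
    by_cases hc : tokens.any (fun tok => PySem.Str.isIn tok g) = true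
    · rw [if_pos hc, if_pos hc]
    · rw [if_neg hc, if_neg hc, ih]

-- the deferred scan equals A's two staged searches
theorem pvDefer_spec (tokens : List String) (fallback : Option Int) : ∀ (headers : List String) (i : Int) (pending : List (Int × String)) (knownAny : Option Int),
    pvDefer headers tokens i pending knownAny fallback =
      match pvFindAll headers tokens i with
      | some j => some j
      | none =>
        pvResolve pending tokens knownAny
          (match pvFindAny headers tokens i with
           | some j => some j
           | none => fallback) := by
  intro headers
  induction headers with
  | nil => intro i pending knownAny; rfl
  | cons header rest ih =>
    intro i pending knownAny
    simp only [pvDefer, pvFindAll, pvFindAny]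
    by_cases hall : tokens.all (fun tok => PySem.Str.isIn tok (PySem.Str.lower header)) = true
    · rw [if_pos ((pvFirstMiss_eq_len_iff _ tokens).mpr hall), if_pos hall]
    · rw [if_neg (fun hk => hall ((pvFirstMiss_eq_len_iff _ tokens).mp hk)), if_neg hall]
      cases knownAny with
      | some a =>
        dsimp only
        rw [ih]
        by_cases hany : tokens.any (fun tok => PySem.Str.isIn tok (PySem.Str.lower header)) = true
        · rw [if_pos hany]
          cases pvFindAll rest tokens (i + 1) with
          | none => dsimp only; rw [pvResolve_known, pvResolve_known]
          | some j => rfl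
        · rw [if_neg hany]
      | none =>
        dsimp only
        by_cases hk : 0 < pvFirstMiss tokens (PySem.Str.lower header)
        · rw [if_pos hk, ih, if_pos (pvFirstMiss_pos_any _ tokens hk)]
          cases pvFindAll rest tokens (i + 1) with
          | none => dsimp only; rw [pvResolve_known]
          | some j => rfl
        · rw [if_neg hk, ih, pvResolve_append]
          by_cases hany : tokens.any (fun tok => PySem.Str.isIn tok (PySem.Str.lower header)) = true
          · rw [if_pos hany, if_pos hany]
          · rw [if_neg hany, if_neg hany]

-- ===== VERDICT (by name: the statement is the Claim_ definition above) =====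
theorem detect_column_index_py_spec : Claim_equal_detect_column_index_py := by
  intro headers tokens fallback _
  unfold Spec_detect_column_index_py detect_column_index_py detect_column_index_py_alt
  rw [pvDefer_spec]
  cases pvFindAll headers tokens 0
  · rfl
  · rfl
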